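-- pv_equiv track=rewrite | github.com/TOP-Python114/Kachan | 08.21/1.2.py | displace_str
-- ===== SOURCE A (Python) =====
-- def displace_str(array):
--     """Функция-генератор, принимающая на вход множество set, и возвращающую в строковом виде перестановки для элементов этого множества"""
--     #array_new = []
--     #counter_1 = 0
--     #counter_2 = 0
--     array = list(array)
--     if not array:
--         yield array
--     else:
--         for counter_1 in range(len(array)):
--             array_new = array[:counter_1] + array[counter_1 + 1:]
--             for counter_2 in displace_str(array_new):
--                 yield array[counter_1: counter_1 + 1] + counter_2
-- ===== SOURCE B (Python) =====
-- def displace_str(array):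
--     """Breadth-first iterative generation: maintain (prefix, remaining) states
--     and extend each prefix by one element per round; same index-lex order as A."""
--     array = list(array)
--     states = [([], array)]
--     for _ in array:
--         states = [(pre + [rem[i]], rem[:i] + rem[i + 1:])
--                   for pre, rem in states
--                   for i in range(len(rem))]
--     for pre, rem in states:
--         yield pre
-- ===== Notes on version B (the rewrite author's own statement) =====
-- stated objective: alternative
-- what changed: Replaces A's head-selection recursion with an iterative breadth-first expansion of (prefix, remaining) states, one round per element, yielding the same index-lexicographic order.
import Mathlib
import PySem

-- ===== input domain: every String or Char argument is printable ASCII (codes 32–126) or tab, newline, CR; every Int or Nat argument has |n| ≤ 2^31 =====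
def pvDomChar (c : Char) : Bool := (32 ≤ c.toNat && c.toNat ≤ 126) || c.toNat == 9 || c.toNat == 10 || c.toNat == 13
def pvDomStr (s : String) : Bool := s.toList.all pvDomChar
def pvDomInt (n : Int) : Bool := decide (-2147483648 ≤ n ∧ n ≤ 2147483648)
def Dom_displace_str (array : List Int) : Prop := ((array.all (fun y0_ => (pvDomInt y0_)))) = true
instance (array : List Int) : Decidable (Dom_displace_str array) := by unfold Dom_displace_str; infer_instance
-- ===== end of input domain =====

-- B replaces A's head-selection recursion by an iterative breadth-first expansion of
-- (prefix, remaining) states, one round per element; same output order (alternative, not faster).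

-- ===== PORT A =====
def displace_str (array : List Int) : List (List Int) :=
  if h : array = [] then [array]
  else
    (PySem.List.pyRange 0 array.length 1).attach.flatMap (fun c1 =>
      let array_new := PySem.List.slice array none (some c1.1) ++
                       PySem.List.slice array (some (c1.1 + 1)) none
      (displace_str array_new).map (fun c2 =>
        PySem.List.slice array (some c1.1) (some (c1.1 + 1)) ++ c2))
termination_by array.length
decreasing_by
  obtain ⟨h1, h2⟩ := (PySem.List.mem_pyRange_one).1 c1.2
  rw [PySem.List.slice_to array h1,
      PySem.List.slice_from array (by omega : (0:Int) ≤ c1.1 + 1)]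
  have hlen : array.length ≠ 0 := by simpa [List.length_eq_zero_iff] using h
  simp only [List.length_append, List.length_take, List.length_drop]
  omega

-- ===== PORT B =====
-- the body of B's list comprehension: expand every (prefix, remaining) state by one element
def displaceStep (states : List (List Int × List Int)) : List (List Int × List Int) :=
  states.flatMap (fun s =>
    (PySem.List.pyRange 0 s.2.length 1).map (fun i =>
      (s.1 ++ [PySem.List.pyGetD s.2 i 0],
       PySem.List.slice s.2 none (some i) ++ PySem.List.slice s.2 (some (i + 1)) none)))

def displace_str_alt (array : List Int) : List (List Int) :=
  (array.foldl (fun states _ => displaceStep states) [([], array)]).map (fun s => s.1)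

-- ===== PRECONDITION & SPEC =====
def Spec_displace_str (array : List Int) (out : List (List Int)) : Prop := out = displace_str_alt array
instance (array : List Int) (out : List (List Int)) : Decidable (Spec_displace_str array out) := by unfold Spec_displace_str; infer_instance

-- ===== CLAIM (what is proved, stated in full; the proofs are below) =====
def Claim_equal_displace_str : Prop := ∀ (array : List Int), Dom_displace_str array → Spec_displace_str array (displace_str array)

-- ===== LEMMAS AND PROOFS =====

theorem flatMap_congr_mem {α β : Type} {l : List α} {f g : α → List β}
    (h : ∀ a ∈ l, f a = g a) : l.flatMap f = l.flatMap g := by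
  simp only [List.flatMap_def]
  rw [List.map_congr_left h]

theorem foldl_iter {α β : Type} (f : α → α) (l : List β) (init : α) :
    l.foldl (fun st _ => f st) init = f^[l.length] init := by
  induction l generalizing init with
  | nil => rfl
  | cons x xs ih => simpa [List.foldl_cons, Function.iterate_succ_apply] using ih (f init)

theorem slice_singleton (xs : List Int) (i : Int) (h0 : 0 ≤ i) (h1 : i < (xs.length : Int)) :
    PySem.List.slice xs (some i) (some (i + 1)) = [PySem.List.pyGetD xs i 0] := by
  rw [PySem.List.slice_toNat xs h0 (by omega)]
  have h2 : (i + 1).toNat - i.toNat = 1 := by omega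
  have h3 : i.toNat < xs.length := by omega
  rw [h2, List.drop_eq_getElem_cons h3, List.take_succ_cons, List.take_zero,
      PySem.List.pyGetD_eq_getElem xs 0 h0 h1]

theorem displace_key : ∀ (k : Nat) (states : List (List Int × List Int)),
    (∀ s ∈ states, s.2.length = k) →
    (displaceStep^[k] states).map (fun s => s.1)
      = states.flatMap (fun s => (displace_str s.2).map (fun c2 => s.1 ++ c2)) := by
  intro k
  induction k with
  | zero =>
    intro states h
    simp only [Function.iterate_zero, id]
    induction states with
    | nil => simp
    | cons s rest ih =>
      have h0 : s.2 = [] := List.length_eq_zero_iff.mp (h s (by simp))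
      rw [List.flatMap_cons, List.map_cons, ih (fun t ht => h t (by simp [ht]))]
      rw [displace_str]
      simp [h0]
  | succ k ih =>
    intro states h
    rw [Function.iterate_succ_apply, ih _ ?hlen]
    case hlen =>
      intro s hs
      unfold displaceStep at hs
      simp only [List.mem_flatMap, List.mem_map] at hs
      obtain ⟨t, ht, i, hi, rfl⟩ := hs
      obtain ⟨h1, h2⟩ := PySem.List.mem_pyRange_one.1 hi
      have hl := h t ht
      simp only [PySem.List.slice_to t.2 h1,
        PySem.List.slice_from t.2 (by omega : (0:Int) ≤ i + 1),
        List.length_append, List.length_take, List.length_drop]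
      omega
    unfold displaceStep
    rw [List.flatMap_assoc]
    apply flatMap_congr_mem
    intro s hs
    have hlen : s.2.length = k + 1 := h s hs
    have hne : s.2 ≠ [] := by intro e; simp [e] at hlen
    rw [displace_str]
    simp only [hne, dite_false, List.map_flatMap, List.flatMap_map]
    rw [show ((PySem.List.pyRange 0 (s.2.length : Int) 1).attach.flatMap (fun c1 =>
          ((displace_str (PySem.List.slice s.2 none (some c1.1) ++
              PySem.List.slice s.2 (some (c1.1 + 1)) none)).map (fun c2 =>
            PySem.List.slice s.2 (some c1.1) (some (c1.1 + 1)) ++ c2)).map (fun c2 => s.1 ++ c2)))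
        = ((PySem.List.pyRange 0 (s.2.length : Int) 1).flatMap (fun i =>
          ((displace_str (PySem.List.slice s.2 none (some i) ++
              PySem.List.slice s.2 (some (i + 1)) none)).map (fun c2 =>
            PySem.List.slice s.2 (some i) (some (i + 1)) ++ c2)).map (fun c2 => s.1 ++ c2)))
        from by simp [List.flatMap_def]]
    apply flatMap_congr_mem
    intro i hi
    obtain ⟨h1, h2⟩ := PySem.List.mem_pyRange_one.1 hi
    rw [List.map_map]
    apply List.map_congr_left
    intro c2 _
    rw [slice_singleton s.2 i h1 (by omega)]
    simp [List.append_assoc]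

-- ===== VERDICT (by name: the statement is the Claim_ definition above) =====
theorem displace_str_spec : Claim_equal_displace_str := by
  intro array _
  unfold Spec_displace_str displace_str_alt
  rw [foldl_iter, displace_key array.length [([], array)] (by simp)]
  simp
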